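-- pv_equiv track=rewrite | github.com/dbreunig/just-bash-py | src/just_bash/interpreter/expansion.py | _split_on_ifs
-- ===== SOURCE A (Python) =====
-- def _split_on_ifs(value: str, ifs: str) -> list[str]:
--     """Split a string on IFS characters.
--
--     IFS whitespace (space, tab, newline) is treated specially:
--     - Leading/trailing IFS whitespace is trimmed
--     - Consecutive IFS whitespace is treated as one delimiter
--     Non-whitespace IFS characters produce empty fields.
--     """
--     if not value:
--         return []
--
--     # Empty IFS: no splitting at all
--     if not ifs:
--         return [value]
--
--     # Identify which IFS chars are whitespace
--     ifs_whitespace = "".join(c for c in ifs if c in " \t\n")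
--     ifs_nonws = "".join(c for c in ifs if c not in " \t\n")
--
--     # If all IFS chars are whitespace, simple split
--     if not ifs_nonws:
--         return value.split()
--
--     # Complex case: mix of whitespace and non-whitespace IFS
--     # Whitespace adjacent to non-whitespace IFS chars forms composite delimiters
--     result = []
--     current = []
--     i = 0
--
--     # Skip leading IFS whitespace
--     while i < len(value) and value[i] in ifs_whitespace:
--         i += 1
--
--     while i < len(value):
--         c = value[i]
--         if c in ifs_whitespace:
--             # Whitespace delimiter
--             if current:
--                 saved = "".join(current)
--                 current = []
--             else:
--                 saved = None
--             # Skip consecutive whitespace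
--             while i < len(value) and value[i] in ifs_whitespace:
--                 i += 1
--             # Check if followed by non-ws IFS char (composite delimiter)
--             if i < len(value) and value[i] in ifs_nonws:
--                 # Composite: ws + nonws counted as one delimiter
--                 if saved is not None:
--                     result.append(saved)
--                 i += 1  # consume the nonws char
--                 # Skip trailing whitespace after nonws
--                 while i < len(value) and value[i] in ifs_whitespace:
--                     i += 1
--             else:
--                 if saved is not None:
--                     result.append(saved)
--         elif c in ifs_nonws:
--             # Non-whitespace delimiter produces field
--             result.append("".join(current))
--             current = []
--             i += 1
--             # Skip trailing IFS whitespace after non-ws delimiter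
--             while i < len(value) and value[i] in ifs_whitespace:
--                 i += 1
--         else:
--             current.append(c)
--             i += 1
--
--     if current:
--         result.append("".join(current))
--
--     return result
-- ===== SOURCE B (Python) =====
-- def _split_on_ifs(value: str, ifs: str) -> list[str]:
--     """Split a string on IFS characters (shell-style field splitting)."""
--     if not value:
--         return []
--     if not ifs:
--         return [value]
--     ifs_whitespace = "".join(c for c in ifs if c in " \t\n")
--     ifs_nonws = "".join(c for c in ifs if c not in " \t\n")
--     if not ifs_nonws:
--         return value.split()
--     # Strip IFS whitespace from both ends, then split by delimiter runs:
--     # a run of IFS chars containing k non-whitespace IFS chars acts as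
--     # max(k, 1) consecutive separators.
--     s = value.strip(ifs_whitespace)
--     fields = []
--     i, n = 0, len(s)
--     while i < n:
--         j = i
--         while j < n and s[j] not in ifs:
--             j += 1
--         fields.append(s[i:j])
--         if j == n:
--             return fields
--         k = 0
--         while j < n and s[j] in ifs:
--             k += s[j] in ifs_nonws
--             j += 1
--         fields.extend([""] * (k - 1))
--         i = j
--     return fields
-- ===== Notes on version B (the rewrite author's own statement) =====
-- stated objective: simpler
-- what changed: A's index state machine with a saved-field sentinel and four nested whitespace-skipping inner loops is replaced by: strip IFS whitespace from both ends, then repeatedly take a field (maximal run of non-IFS chars) and a whole delimiter run, a run with k non-whitespace IFS chars contributing k-1 empty fields.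
import Mathlib
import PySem

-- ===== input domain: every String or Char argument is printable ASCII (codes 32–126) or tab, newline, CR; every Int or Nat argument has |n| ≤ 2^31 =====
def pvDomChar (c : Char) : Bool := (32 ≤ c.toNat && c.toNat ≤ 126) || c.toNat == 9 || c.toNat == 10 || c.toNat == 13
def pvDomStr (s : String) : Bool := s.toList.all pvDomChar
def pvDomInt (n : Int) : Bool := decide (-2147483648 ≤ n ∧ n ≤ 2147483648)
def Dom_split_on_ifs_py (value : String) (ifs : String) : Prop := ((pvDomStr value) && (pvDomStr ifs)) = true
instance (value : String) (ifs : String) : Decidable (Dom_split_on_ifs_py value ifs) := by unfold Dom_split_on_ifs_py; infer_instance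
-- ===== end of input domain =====

-- B replaces A's index loop with nested whitespace-skipping whiles and a `saved` sentinel
-- by: strip IFS whitespace at both ends, then consume the string run by run (a field, then a
-- delimiter run acting as max(k,1) separators where k counts its non-ws IFS chars) — simpler.

-- ===== PORT A =====
-- inner `while i < len(value) and value[i] in ifs_whitespace: i += 1` on the remaining suffix
def pvSkipWs (wsl : List Char) : List Char → List Char
  | [] => []
  | c :: rest => if c ∈ wsl then pvSkipWs wsl rest else c :: rest

theorem pvDropWhileHead {α : Type} (p : α → Bool) :
    ∀ (l : List α) (d : α) (r' : List α), l.dropWhile p = d :: r' → p d = false := by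
  intro l
  induction l with
  | nil => intro d r' h; simp [List.dropWhile] at h
  | cons a l ih =>
    intro d r' h
    rw [List.dropWhile_cons] at h
    split at h
    · exact ih _ _ h
    · rename_i hpa; cases h; simpa using hpa

theorem pvSkipWs_length_le (wsl : List Char) (l : List Char) : (pvSkipWs wsl l).length ≤ l.length := by
  induction l with
  | nil => simp [pvSkipWs]
  | cons c rest ih =>
    simp only [pvSkipWs]
    split
    · exact le_trans ih (by simp)
    · simp

-- A's main `while i < len(value)` loop: state = (remaining suffix, current, result)
def pvLoopA (wsl nwl : List Char) : List Char → List Char → List String → List String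
  | [], current, result =>
      if current ≠ [] then result ++ [String.ofList current] else result
  | c :: rest, current, result =>
      if c ∈ wsl then
        -- whitespace delimiter: save current (None ~ []), skip ws, check composite
        let saved : List String := if current ≠ [] then [String.ofList current] else []
        match hu : pvSkipWs wsl rest with
        | d :: u' =>
            if d ∈ nwl then
              -- composite: ws + nonws (+ trailing ws) counted as one delimiter
              pvLoopA wsl nwl (pvSkipWs wsl u') [] (result ++ saved)
            else
              pvLoopA wsl nwl (d :: u') [] (result ++ saved)
        | [] => pvLoopA wsl nwl [] [] (result ++ saved)
      else if c ∈ nwl then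
        -- non-whitespace delimiter produces a field, then skip trailing ws
        pvLoopA wsl nwl (pvSkipWs wsl rest) [] (result ++ [String.ofList current])
      else
        pvLoopA wsl nwl rest (current ++ [c]) result
  termination_by t _ _ => t.length
  decreasing_by
  · have h1 := pvSkipWs_length_le wsl u'
    have h2 : (d :: u').length ≤ rest.length := hu ▸ pvSkipWs_length_le wsl rest
    simp at h2 ⊢
    omega
  · have h2 : (d :: u').length ≤ rest.length := hu ▸ pvSkipWs_length_le wsl rest
    simp at h2 ⊢
    omega
  · simp
  · have := pvSkipWs_length_le wsl rest
    simp
    omega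
  · simp

def split_on_ifs_py (value : String) (ifs : String) : List String :=
  if value = "" then []
  else if ifs = "" then [value]
  else
    let wsl := ifs.toList.filter (fun c => c == ' ' || c == '\t' || c == '\n')
    let nwl := ifs.toList.filter (fun c => !(c == ' ' || c == '\t' || c == '\n'))
    if nwl = [] then PySem.Str.split₀ value
    else pvLoopA wsl nwl (pvSkipWs wsl value.toList) [] []

-- ===== PORT B =====
-- value.strip(ifs_whitespace): drop chars of wsl from both ends (exact port of str.strip(chars))
def pvStrip (wsl : List Char) (l : List Char) : List Char :=
  ((l.dropWhile (fun c => decide (c ∈ wsl))).reverse.dropWhile (fun c => decide (c ∈ wsl))).reverse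

-- B's `while i < n` loop: take a field (run of non-IFS chars), then a delimiter run with k
-- non-ws IFS chars contributing k-1 empty fields; state = (remaining suffix, fields)
def pvLoopB (ifsl nwl : List Char) : List Char → List String → List String
  | [], fields => fields
  | c :: s', fields =>
      match hr : (c :: s').dropWhile (fun a => !decide (a ∈ ifsl)) with
      | [] => fields ++ [String.ofList ((c :: s').takeWhile (fun a => !decide (a ∈ ifsl)))]
      | d :: r' =>
          pvLoopB ifsl nwl ((d :: r').dropWhile (fun a => decide (a ∈ ifsl)))
            (fields ++ [String.ofList ((c :: s').takeWhile (fun a => !decide (a ∈ ifsl)))]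
                    ++ List.replicate ((((d :: r').takeWhile (fun a => decide (a ∈ ifsl))).filter
                          (fun a => decide (a ∈ nwl))).length - 1) "")
  termination_by s _ => s.length
  decreasing_by
    have hlen : (d :: r').length ≤ (c :: s').length := hr ▸ List.length_dropWhile_le _ _
    have hd : decide (d ∈ ifsl) = true := by
      have h := pvDropWhileHead (fun a => !decide (a ∈ ifsl)) (c :: s') d r' hr
      simpa using h
    rw [List.dropWhile_cons, hd]
    have := List.length_dropWhile_le (fun a => decide (a ∈ ifsl)) r'
    simp at hlen ⊢
    omega

def split_on_ifs_py_alt (value : String) (ifs : String) : List String :=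
  if value = "" then []
  else if ifs = "" then [value]
  else
    let wsl := ifs.toList.filter (fun c => c == ' ' || c == '\t' || c == '\n')
    let nwl := ifs.toList.filter (fun c => !(c == ' ' || c == '\t' || c == '\n'))
    if nwl = [] then PySem.Str.split₀ value
    else pvLoopB ifs.toList nwl (pvStrip wsl value.toList) []

-- ===== PRECONDITION & SPEC =====
def Spec_split_on_ifs_py (value : String) (ifs : String) (out : List String) : Prop := out = split_on_ifs_py_alt value ifs
instance (value : String) (ifs : String) (out : List String) : Decidable (Spec_split_on_ifs_py value ifs out) := by unfold Spec_split_on_ifs_py; infer_instance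

-- ===== CLAIM (what is proved, stated in full; the proofs are below) =====
def Claim_equal_split_on_ifs_py : Prop := ∀ (value : String) (ifs : String), Dom_split_on_ifs_py value ifs → Spec_split_on_ifs_py value ifs (split_on_ifs_py value ifs)

-- ===== LEMMAS AND PROOFS =====

-- drop wsl chars from the right end only
def pvRstrip (wsl : List Char) (l : List Char) : List Char :=
  (l.reverse.dropWhile (fun c => decide (c ∈ wsl))).reverse

theorem pvSkipWs_eq_dropWhile (wsl l : List Char) :
    pvSkipWs wsl l = l.dropWhile (fun c => decide (c ∈ wsl)) := by
  induction l with
  | nil => rfl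
  | cons c rest ih => simp only [pvSkipWs, List.dropWhile_cons]; split <;> simp_all

theorem pvSkipWs_idem (wsl l : List Char) :
    pvSkipWs wsl (pvSkipWs wsl l) = pvSkipWs wsl l := by
  induction l with
  | nil => rfl
  | cons c rest ih =>
    by_cases h : c ∈ wsl
    · simp [pvSkipWs, h, ih]
    · simp [pvSkipWs, h]

theorem pvRstrip_eq_nil_iff (wsl l : List Char) :
    pvRstrip wsl l = [] ↔ ∀ a ∈ l, a ∈ wsl := by
  simp [pvRstrip, List.dropWhile_eq_nil_iff]

theorem pvRstrip_append_of_nil (wsl xs ys : List Char) (h : pvRstrip wsl ys = []) :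
    pvRstrip wsl (xs ++ ys) = pvRstrip wsl xs := by
  have h' : ys.reverse.dropWhile (fun c => decide (c ∈ wsl)) = [] := by
    have := congrArg List.reverse h
    simpa [pvRstrip] using this
  simp [pvRstrip, List.reverse_append, List.dropWhile_append, h']

theorem pvRstrip_append_of_ne_nil (wsl xs ys : List Char) (h : pvRstrip wsl ys ≠ []) :
    pvRstrip wsl (xs ++ ys) = xs ++ pvRstrip wsl ys := by
  have h' : ¬ (ys.reverse.dropWhile (fun c => decide (c ∈ wsl))).isEmpty = true := by
    intro hc
    exact h (by simp [pvRstrip, List.isEmpty_iff.mp hc])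
  simp [pvRstrip, List.reverse_append, List.dropWhile_append, h']

theorem pvRstrip_cons_of_not_mem (wsl : List Char) (c : Char) (t : List Char) (h : c ∉ wsl) :
    pvRstrip wsl (c :: t) = c :: pvRstrip wsl t := by
  have hc : pvRstrip wsl [c] = [c] := by
    simp [pvRstrip, h]
  by_cases hn : pvRstrip wsl t = []
  · rw [show c :: t = [c] ++ t from rfl, pvRstrip_append_of_nil wsl [c] t hn, hc, hn]
  · rw [show c :: t = [c] ++ t from rfl, pvRstrip_append_of_ne_nil wsl [c] t hn]
    rfl

theorem pvLoopB_rest_len (ifsl : List Char) (c : Char) (s' : List Char) (d : Char) (r' : List Char)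
    (hr : (c :: s').dropWhile (fun a => !decide (a ∈ ifsl)) = d :: r') :
    ((d :: r').dropWhile (fun a => decide (a ∈ ifsl))).length ≤ s'.length := by
  have hlen : (d :: r').length ≤ (c :: s').length := hr ▸ List.length_dropWhile_le _ _
  have hd : decide (d ∈ ifsl) = true := by
    have h := pvDropWhileHead (fun a => !decide (a ∈ ifsl)) (c :: s') d r' hr
    simpa using h
  rw [List.dropWhile_cons, hd]
  have := List.length_dropWhile_le (fun a => decide (a ∈ ifsl)) r'
  simp at hlen ⊢
  omega

-- the accumulator of pvLoopB only ever grows on the right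
theorem pvLoopB_acc (ifsl nwl : List Char) :
    ∀ (n : Nat) (s : List Char), s.length ≤ n → ∀ (f : List String),
      pvLoopB ifsl nwl s f = f ++ pvLoopB ifsl nwl s [] := by
  intro n
  induction n with
  | zero =>
    intro s hs f
    have hs0 : s = [] := List.length_eq_zero_iff.mp (Nat.le_zero.mp hs)
    subst hs0; simp [pvLoopB]
  | succ n ih =>
    intro s hs f
    cases s with
    | nil => simp [pvLoopB]
    | cons c s' =>
      rw [pvLoopB.eq_def]
      conv_rhs => rw [pvLoopB.eq_def]
      simp only []
      split
      · simp
      · rename_i d r' h1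
        have hle : ((d :: r').dropWhile (fun a => decide (a ∈ ifsl))).length ≤ n := by
          have := pvLoopB_rest_len ifsl c s' d r' h1
          simp at hs
          omega
        rw [ih _ hle]
        conv_rhs => rw [ih _ hle]
        simp

-- pvLoopB on a pure field (no IFS chars)
theorem pvLoopB_text (ifsl nwl cur : List Char) (hcur : ∀ a ∈ cur, ¬ a ∈ ifsl) (hne : cur ≠ []) :
    pvLoopB ifsl nwl cur [] = [String.ofList cur] := by
  cases cur with
  | nil => exact absurd rfl hne
  | cons c0 cur' =>
    have hdw : (c0 :: cur').dropWhile (fun a => !decide (a ∈ ifsl)) = [] := by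
      rw [List.dropWhile_eq_nil_iff]
      intro x hx
      simpa using hcur x hx
    have htw : (c0 :: cur').takeWhile (fun a => !decide (a ∈ ifsl)) = c0 :: cur' := by
      rw [List.takeWhile_eq_self_iff]
      intro x hx
      simpa using hcur x hx
    rw [pvLoopB.eq_def]
    simp only []
    split
    · rw [htw]; simp
    · rename_i d r' h1
      rw [hdw] at h1
      exact absurd h1 (by simp)

-- pvLoopB on a field followed by a delimiter run
theorem pvLoopB_text_run (ifsl nwl cur : List Char) (e : Char) (x' : List Char)
    (he : e ∈ ifsl) (hcur : ∀ a ∈ cur, ¬ a ∈ ifsl) :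
    pvLoopB ifsl nwl (cur ++ e :: x') [] =
      [String.ofList cur]
        ++ List.replicate ((((e :: x').takeWhile (fun a => decide (a ∈ ifsl))).filter
              (fun a => decide (a ∈ nwl))).length - 1) ""
        ++ pvLoopB ifsl nwl ((e :: x').dropWhile (fun a => decide (a ∈ ifsl))) [] := by
  have hp : ∀ a ∈ cur, (fun a => !decide (a ∈ ifsl)) a = true := by
    intro a ha; simpa using hcur a ha
  have hdrop : (cur ++ e :: x').dropWhile (fun a => !decide (a ∈ ifsl)) = e :: x' := by
    rw [List.dropWhile_append_of_pos hp, List.dropWhile_cons]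
    simp [he]
  have htake : (cur ++ e :: x').takeWhile (fun a => !decide (a ∈ ifsl)) = cur := by
    rw [List.takeWhile_append_of_pos hp, List.takeWhile_cons]
    simp [he]
  rw [pvLoopB.eq_def]
  split
  · rename_i h1
    exact absurd h1 (by simp)
  · rename_i c0 s0 h1
    split
    · rename_i h2
      rw [← h1, hdrop] at h2
      exact absurd h2 (by simp)
    · rename_i d r' h2
      rw [← h1, hdrop] at h2
      cases h2
      rw [← h1]
      rw [htake]
      rw [pvLoopB_acc ifsl nwl (((e :: x').dropWhile (fun a => decide (a ∈ ifsl))).length) _ le_rfl]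
      simp

-- one whole delimiter run (not starting with IFS whitespace) processed by pvLoopB
theorem pvLoopB_run (ifsl wsl nwl : List Char)
    (hu : ∀ c, c ∈ ifsl ↔ (c ∈ wsl ∨ c ∈ nwl))
    (w : List Char) (hw : ∀ hd ∈ w.head?, hd ∉ wsl) :
    pvLoopB ifsl nwl w [] =
      List.replicate (((w.takeWhile (fun a => decide (a ∈ ifsl))).filter
          (fun a => decide (a ∈ nwl))).length) ""
        ++ pvLoopB ifsl nwl (w.dropWhile (fun a => decide (a ∈ ifsl))) [] := by
  cases w with
  | nil => simp
  | cons e w' =>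
    have hew : e ∉ wsl := hw e (by simp)
    by_cases hei : e ∈ ifsl
    · have hen : e ∈ nwl := ((hu e).mp hei).resolve_left hew
      have h := pvLoopB_text_run ifsl nwl [] e w' hei (by simp)
      rw [List.nil_append] at h
      rw [h]
      have hmem : e ∈ ((e :: w').takeWhile (fun a => decide (a ∈ ifsl))).filter
          (fun a => decide (a ∈ nwl)) := by
        rw [List.takeWhile_cons]
        simp [hei, hen]
      have hk : 1 ≤ (((e :: w').takeWhile (fun a => decide (a ∈ ifsl))).filter
          (fun a => decide (a ∈ nwl))).length := List.length_pos_of_mem hmem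
      have hrep : (((e :: w').takeWhile (fun a => decide (a ∈ ifsl))).filter
          (fun a => decide (a ∈ nwl))).length
          = ((((e :: w').takeWhile (fun a => decide (a ∈ ifsl))).filter
          (fun a => decide (a ∈ nwl))).length - 1) + 1 := by omega
      rw [hrep, List.replicate_succ]
      simp
    · rw [List.takeWhile_cons, List.dropWhile_cons]
      simp [hei]

-- pvLoopB on a field, a whole delimiter run P (all IFS chars), and a normalized remainder S
theorem pvLoopB_delim (ifsl nwl : List Char)
    (cur P S : List Char) (hPne : P ≠ []) (hPq : ∀ a ∈ P, a ∈ ifsl)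
    (hcur : ∀ a ∈ cur, ¬ a ∈ ifsl) :
    pvLoopB ifsl nwl (cur ++ (P ++ S)) [] =
      [String.ofList cur]
        ++ List.replicate ((P.filter (fun a => decide (a ∈ nwl))).length
              + ((S.takeWhile (fun a => decide (a ∈ ifsl))).filter (fun a => decide (a ∈ nwl))).length
              - 1) ""
        ++ pvLoopB ifsl nwl (S.dropWhile (fun a => decide (a ∈ ifsl))) [] := by
  cases P with
  | nil => exact absurd rfl hPne
  | cons e0 P' =>
    have he0 : e0 ∈ ifsl := hPq e0 (by simp)
    have hcons : cur ++ ((e0 :: P') ++ S) = cur ++ e0 :: (P' ++ S) := by simp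
    rw [hcons, pvLoopB_text_run ifsl nwl cur e0 (P' ++ S) he0 hcur]
    have hPq' : ∀ a ∈ (e0 :: P'), (fun a => decide (a ∈ ifsl)) a = true := by
      intro a ha; simpa using hPq a ha
    have hsplit : e0 :: (P' ++ S) = (e0 :: P') ++ S := rfl
    rw [hsplit, List.takeWhile_append_of_pos hPq', List.dropWhile_append_of_pos hPq',
        List.filter_append, List.length_append]

-- after skipping IFS whitespace, the remainder neither starts nor (once rstripped) is hidden ws
theorem pvRstrip_skip_head (wsl u : List Char) :
    ∀ hd ∈ (pvRstrip wsl (pvSkipWs wsl u)).head?, hd ∉ wsl := by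
  intro hd hhd
  cases hv : pvSkipWs wsl u with
  | nil => rw [hv] at hhd; simp [pvRstrip] at hhd
  | cons e v0 =>
    have hevw : e ∉ wsl := by
      have h := pvDropWhileHead (fun a => decide (a ∈ wsl)) u e v0
        (by rw [← pvSkipWs_eq_dropWhile]; exact hv)
      simpa using h
    rw [hv, pvRstrip_cons_of_not_mem wsl e _ hevw] at hhd
    simp at hhd
    exact hhd ▸ hevw

theorem pvRstrip_skip_nil (wsl u : List Char) (h : pvRstrip wsl (pvSkipWs wsl u) = []) :
    pvSkipWs wsl u = [] := by
  cases hv : pvSkipWs wsl u with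
  | nil => rfl
  | cons e v0 =>
    have hevw : e ∉ wsl := by
      have h2 := pvDropWhileHead (fun a => decide (a ∈ wsl)) u e v0
        (by rw [← pvSkipWs_eq_dropWhile]; exact hv)
      simpa using h2
    rw [hv, pvRstrip_cons_of_not_mem wsl e _ hevw] at h
    simp at h

theorem pvRstrip_of_skip_nil (wsl u : List Char) (h : pvSkipWs wsl u = []) :
    pvRstrip wsl u = [] := by
  rw [(pvRstrip_eq_nil_iff wsl u).mpr]
  intro a ha
  have hdec : u = u.takeWhile (fun a => decide (a ∈ wsl)) ++ pvSkipWs wsl u := by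
    conv_lhs => rw [← List.takeWhile_append_dropWhile (p := fun a => decide (a ∈ wsl)) (l := u)]
    rw [← pvSkipWs_eq_dropWhile]
  rw [hdec, h, List.append_nil] at ha
  simpa using List.mem_takeWhile_imp ha

theorem pvRstrip_decomp (wsl u : List Char) (h : pvRstrip wsl (pvSkipWs wsl u) ≠ []) :
    pvRstrip wsl u = u.takeWhile (fun a => decide (a ∈ wsl)) ++ pvRstrip wsl (pvSkipWs wsl u) := by
  have hdec : u = u.takeWhile (fun a => decide (a ∈ wsl)) ++ pvSkipWs wsl u := by
    conv_lhs => rw [← List.takeWhile_append_dropWhile (p := fun a => decide (a ∈ wsl)) (l := u)]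
    rw [← pvSkipWs_eq_dropWhile]
  conv_lhs => rw [hdec]
  exact pvRstrip_append_of_ne_nil wsl _ _ h

-- the main simulation: A's loop equals B's loop on current ++ rstrip(remaining)
theorem pvMain (ifsl wsl nwl : List Char)
    (hu : ∀ c, c ∈ ifsl ↔ (c ∈ wsl ∨ c ∈ nwl)) (hdj : ∀ c, c ∈ wsl → ¬ c ∈ nwl) :
    ∀ (n : Nat) (t cur : List Char) (res : List String), t.length ≤ n →
      (∀ a ∈ cur, ¬ a ∈ ifsl) →
      (cur = [] → pvSkipWs wsl t = t) →
      pvLoopA wsl nwl t cur res = res ++ pvLoopB ifsl nwl (cur ++ pvRstrip wsl t) [] := by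
  have hwsub : ∀ c, c ∈ wsl → c ∈ ifsl := fun c hc => (hu c).mpr (Or.inl hc)
  have hnsub : ∀ c, c ∈ nwl → c ∈ ifsl := fun c hc => (hu c).mpr (Or.inr hc)
  have harith : ∀ m : Nat, 1 + m - 1 = m := fun m => by omega
  have hnil : ∀ (cur : List Char) (res : List String), (∀ a ∈ cur, ¬ a ∈ ifsl) →
      pvLoopA wsl nwl [] cur res = res ++ pvLoopB ifsl nwl (cur ++ pvRstrip wsl []) [] := by
    intro cur res hcur
    have h0 : pvRstrip wsl ([] : List Char) = [] := rfl
    rw [h0, List.append_nil, pvLoopA.eq_def]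
    cases cur with
    | nil => simp [pvLoopB]
    | cons c0 cur' =>
      rw [pvLoopB_text ifsl nwl _ hcur (by simp)]
      simp
  intro n
  induction n with
  | zero =>
    intro t cur res ht hcur _
    have ht0 : t = [] := List.length_eq_zero_iff.mp (Nat.le_zero.mp ht)
    subst ht0
    exact hnil cur res hcur
  | succ n ih =>
    intro t cur res ht hcur hnorm
    cases t with
    | nil => exact hnil cur res hcur
    | cons c rest =>
      simp only [List.length_cons] at ht
      by_cases hcw : c ∈ wsl
      · -- A's IFS-whitespace branch
        have hcurne : cur ≠ [] := by
          intro hc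
          have h0 := hnorm hc
          have h1 : pvSkipWs wsl (c :: rest) = pvSkipWs wsl rest := by simp [pvSkipWs, hcw]
          have h2 := pvSkipWs_length_le wsl rest
          rw [h0] at h1
          rw [← h1] at h2
          simp at h2
        have hskip : pvSkipWs wsl (c :: rest) = pvSkipWs wsl rest := by simp [pvSkipWs, hcw]
        have hWdec : c :: rest = (c :: rest).takeWhile (fun a => decide (a ∈ wsl)) ++ pvSkipWs wsl rest := by
          conv_lhs => rw [← List.takeWhile_append_dropWhile (p := fun a => decide (a ∈ wsl)) (l := c :: rest)]
          rw [← pvSkipWs_eq_dropWhile, hskip]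
        have hWall : ∀ a ∈ (c :: rest).takeWhile (fun a => decide (a ∈ wsl)), a ∈ ifsl := by
          intro a ha
          exact hwsub a (by simpa using List.mem_takeWhile_imp ha)
        have hWfil : ((c :: rest).takeWhile (fun a => decide (a ∈ wsl))).filter
            (fun a => decide (a ∈ nwl)) = [] := by
          rw [List.filter_eq_nil_iff]
          intro a ha
          have : a ∈ wsl := by simpa using List.mem_takeWhile_imp ha
          simpa using hdj a this
        have hWne : (c :: rest).takeWhile (fun a => decide (a ∈ wsl)) ≠ [] := by
          rw [List.takeWhile_cons]
          simp [hcw]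
        rw [pvLoopA.eq_def]
        simp only [if_pos hcw, if_pos hcurne]
        split
        · -- an IFS char follows the whitespace run
          rename_i d u' hu0
          have hdnw : d ∉ wsl := by
            have h := pvDropWhileHead (fun a => decide (a ∈ wsl)) rest d u'
              (by rw [← pvSkipWs_eq_dropWhile]; exact hu0)
            simpa using h
          have hl1 : u'.length + 1 ≤ rest.length := by
            have h := pvSkipWs_length_le wsl rest
            rw [hu0] at h
            simpa using h
          have hW2fil : (u'.takeWhile (fun a => decide (a ∈ wsl))).filter
              (fun a => decide (a ∈ nwl)) = [] := by
            rw [List.filter_eq_nil_iff]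
            intro a ha
            have : a ∈ wsl := by simpa using List.mem_takeWhile_imp ha
            simpa using hdj a this
          by_cases hdn : d ∈ nwl
          · -- composite delimiter: ws+ nonws ws*
            rw [if_pos hdn]
            have hvlen : (pvSkipWs wsl u').length ≤ n := by
              have h := pvSkipWs_length_le wsl u'
              omega
            rw [ih (pvSkipWs wsl u') [] (res ++ [String.ofList cur]) hvlen (by simp)
                (fun _ => pvSkipWs_idem wsl u'), List.nil_append]
            by_cases hvnil : pvRstrip wsl (pvSkipWs wsl u') = []
            · -- nothing after the composite delimiter
              have hvn := pvRstrip_skip_nil wsl u' hvnil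
              have hRu' : pvRstrip wsl u' = [] := pvRstrip_of_skip_nil wsl u' hvn
              have hRd : pvRstrip wsl (d :: u') = [d] := by
                rw [pvRstrip_cons_of_not_mem wsl d u' hdnw, hRu']
              have hR : pvRstrip wsl (c :: rest) =
                  ((c :: rest).takeWhile (fun a => decide (a ∈ wsl)) ++ [d]) ++ [] := by
                conv_lhs => rw [hWdec, hu0]
                rw [pvRstrip_append_of_ne_nil wsl _ _ (by rw [hRd]; simp), hRd]
                simp
              rw [hR, hvnil,
                  pvLoopB_delim ifsl nwl cur _ []
                    (fun h => hWne (List.append_eq_nil_iff.mp h).1)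
                    (by intro a ha
                        rcases List.mem_append.mp ha with h | h
                        · exact hWall a h
                        · simp at h; rw [h]; exact hnsub d hdn)
                    hcur]
              simp [List.filter_append, hWfil, hdn, pvLoopB]
            · -- material after the composite delimiter
              have hRd : pvRstrip wsl (d :: u') =
                  d :: (u'.takeWhile (fun a => decide (a ∈ wsl)) ++ pvRstrip wsl (pvSkipWs wsl u')) := by
                rw [pvRstrip_cons_of_not_mem wsl d u' hdnw, pvRstrip_decomp wsl u' hvnil]
              have hR : pvRstrip wsl (c :: rest) =
                  ((c :: rest).takeWhile (fun a => decide (a ∈ wsl))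
                    ++ ([d] ++ u'.takeWhile (fun a => decide (a ∈ wsl))))
                    ++ pvRstrip wsl (pvSkipWs wsl u') := by
                conv_lhs => rw [hWdec, hu0]
                rw [pvRstrip_append_of_ne_nil wsl _ _ (by rw [hRd]; simp), hRd]
                simp
              rw [hR, pvLoopB_delim ifsl nwl cur _ _
                    (fun h => hWne (List.append_eq_nil_iff.mp h).1)
                    (by intro a ha
                        rcases List.mem_append.mp ha with h | h
                        · exact hWall a h
                        · rcases List.mem_append.mp h with h2 | h2
                          · simp at h2; rw [h2]; exact hnsub d hdn
                          · exact hwsub a (by simpa using List.mem_takeWhile_imp h2))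
                    hcur,
                  pvLoopB_run ifsl wsl nwl hu (pvRstrip wsl (pvSkipWs wsl u'))
                    (pvRstrip_skip_head wsl u')]
              simp [List.filter_append, hWfil, hW2fil, hdn, harith]
          · -- next char is not an IFS char: the ws run was a plain delimiter
            rw [if_neg hdn]
            have hdif : d ∉ ifsl := fun h => ((hu d).mp h).elim (fun h' => hdnw h') (fun h' => hdn h')
            have hlen2 : (d :: u').length ≤ n := by simp; omega
            rw [ih (d :: u') [] (res ++ [String.ofList cur]) hlen2 (by simp)
                (fun _ => by simp [pvSkipWs, hdnw]), List.nil_append]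
            have hRd : pvRstrip wsl (d :: u') = d :: pvRstrip wsl u' :=
              pvRstrip_cons_of_not_mem wsl d u' hdnw
            have hR : pvRstrip wsl (c :: rest) =
                (c :: rest).takeWhile (fun a => decide (a ∈ wsl)) ++ pvRstrip wsl (d :: u') := by
              conv_lhs => rw [hWdec, hu0]
              exact pvRstrip_append_of_ne_nil wsl _ _ (by rw [hRd]; simp)
            rw [hR, pvLoopB_delim ifsl nwl cur _ _ hWne hWall hcur]
            rw [hRd, List.takeWhile_cons, List.dropWhile_cons]
            have hfilrest : (rest.takeWhile (fun a => decide (a ∈ wsl))).filter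
                (fun a => decide (a ∈ nwl)) = [] := by
              rw [List.filter_eq_nil_iff]
              intro a ha
              have haw : a ∈ wsl := by simpa using List.mem_takeWhile_imp ha
              simpa using hdj a haw
            have hcnw : c ∉ nwl := hdj c hcw
            simp [hdif, hcw, hcnw, hfilrest]
        · -- the whitespace run reaches the end of the string
          rename_i hu0
          have hall : ∀ a ∈ c :: rest, a ∈ wsl := by
            intro a ha
            have ha' : a ∈ (c :: rest).takeWhile (fun a => decide (a ∈ wsl)) ++ pvSkipWs wsl rest :=
              hWdec ▸ ha
            rw [hu0, List.append_nil] at ha'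
            simpa using List.mem_takeWhile_imp ha'
          rw [pvLoopA.eq_def]
          rw [(pvRstrip_eq_nil_iff wsl (c :: rest)).mpr hall, List.append_nil,
              pvLoopB_text ifsl nwl cur hcur hcurne]
          simp
      · -- c is not IFS whitespace
        by_cases hcn : c ∈ nwl
        · -- A's non-whitespace-delimiter branch
          have hcif : c ∈ ifsl := hnsub c hcn
          rw [pvLoopA.eq_def]
          simp only [if_neg hcw, if_pos hcn]
          have hvlen : (pvSkipWs wsl rest).length ≤ n := by
            have h := pvSkipWs_length_le wsl rest
            omega
          rw [ih (pvSkipWs wsl rest) [] (res ++ [String.ofList cur]) hvlen (by simp)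
              (fun _ => pvSkipWs_idem wsl rest), List.nil_append]
          have hW2fil : (rest.takeWhile (fun a => decide (a ∈ wsl))).filter
              (fun a => decide (a ∈ nwl)) = [] := by
            rw [List.filter_eq_nil_iff]
            intro a ha
            have : a ∈ wsl := by simpa using List.mem_takeWhile_imp ha
            simpa using hdj a this
          by_cases hvnil : pvRstrip wsl (pvSkipWs wsl rest) = []
          · have hvn := pvRstrip_skip_nil wsl rest hvnil
            have hRrest : pvRstrip wsl rest = [] := pvRstrip_of_skip_nil wsl rest hvn
            have hR : pvRstrip wsl (c :: rest) = [c] ++ [] := by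
              rw [pvRstrip_cons_of_not_mem wsl c rest hcw, hRrest]
              simp
            rw [hR, hvnil,
                pvLoopB_delim ifsl nwl cur [c] [] (by simp)
                  (by intro a ha; simp at ha; rw [ha]; exact hcif) hcur]
            simp [hcn, pvLoopB]
          · have hR : pvRstrip wsl (c :: rest) =
                ([c] ++ rest.takeWhile (fun a => decide (a ∈ wsl)))
                  ++ pvRstrip wsl (pvSkipWs wsl rest) := by
              rw [pvRstrip_cons_of_not_mem wsl c rest hcw, pvRstrip_decomp wsl rest hvnil]
              simp
            rw [hR, pvLoopB_delim ifsl nwl cur _ _ (by simp)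
                  (by intro a ha
                      rcases List.mem_append.mp ha with h | h
                      · simp at h; rw [h]; exact hcif
                      · exact hwsub a (by simpa using List.mem_takeWhile_imp h))
                  hcur,
                pvLoopB_run ifsl wsl nwl hu (pvRstrip wsl (pvSkipWs wsl rest))
                  (pvRstrip_skip_head wsl rest)]
            simp [hW2fil, hcn, harith]
        · -- ordinary character: accumulate into current
          have hcif : c ∉ ifsl := fun h => ((hu c).mp h).elim (fun h' => hcw h') (fun h' => hcn h')
          rw [pvLoopA.eq_def]
          simp only [if_neg hcw, if_neg hcn]
          rw [ih rest (cur ++ [c]) res (by omega)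
              (by intro a ha
                  rcases List.mem_append.mp ha with h | h
                  · exact hcur a h
                  · simp at h; rw [h]; exact hcif)
              (fun h => absurd h (by simp))]
          rw [pvRstrip_cons_of_not_mem wsl c rest hcw]
          simp

-- ===== VERDICT (by name: the statement is the Claim_ definition above) =====
theorem split_on_ifs_py_spec : Claim_equal_split_on_ifs_py := by
  intro value ifs _
  unfold Spec_split_on_ifs_py split_on_ifs_py split_on_ifs_py_alt
  by_cases hv : value = ""
  · simp [hv]
  · simp only [if_neg hv]
    by_cases hi : ifs = ""
    · simp [hi]
    · simp only [if_neg hi]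
      by_cases hnw : ifs.toList.filter (fun c => !(c == ' ' || c == '\t' || c == '\n')) = []
      · simp only [hnw]
        simp
      · rw [if_neg hnw, if_neg hnw]
        have hu : ∀ c, c ∈ ifs.toList ↔
            (c ∈ ifs.toList.filter (fun c => c == ' ' || c == '\t' || c == '\n') ∨
             c ∈ ifs.toList.filter (fun c => !(c == ' ' || c == '\t' || c == '\n'))) := by
          intro c
          constructor
          · intro hc
            by_cases h : (c == ' ' || c == '\t' || c == '\n') = true
            · exact Or.inl (List.mem_filter.mpr ⟨hc, h⟩)
            · exact Or.inr (List.mem_filter.mpr ⟨hc, by simp [h]⟩)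
          · intro hc
            rcases hc with h | h
            · exact (List.mem_filter.mp h).1
            · exact (List.mem_filter.mp h).1
        have hdj : ∀ c, c ∈ ifs.toList.filter (fun c => c == ' ' || c == '\t' || c == '\n') →
            ¬ c ∈ ifs.toList.filter (fun c => !(c == ' ' || c == '\t' || c == '\n')) := by
          intro c hc hn
          simp only [List.mem_filter] at hc hn
          rw [hc.2] at hn
          simp at hn
        have hmain := pvMain ifs.toList
            (ifs.toList.filter (fun c => c == ' ' || c == '\t' || c == '\n'))
            (ifs.toList.filter (fun c => !(c == ' ' || c == '\t' || c == '\n'))) hu hdj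
            (pvSkipWs (ifs.toList.filter (fun c => c == ' ' || c == '\t' || c == '\n')) value.toList).length
            (pvSkipWs (ifs.toList.filter (fun c => c == ' ' || c == '\t' || c == '\n')) value.toList)
            [] [] le_rfl (by simp)
            (fun _ => pvSkipWs_idem _ value.toList)
        rw [hmain]
        have hstrip : pvStrip (ifs.toList.filter (fun c => c == ' ' || c == '\t' || c == '\n')) value.toList
            = pvRstrip (ifs.toList.filter (fun c => c == ' ' || c == '\t' || c == '\n'))
              (pvSkipWs (ifs.toList.filter (fun c => c == ' ' || c == '\t' || c == '\n')) value.toList) := by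
          simp [pvStrip, pvRstrip, pvSkipWs_eq_dropWhile]
        rw [hstrip]
        simp
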